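-- pv_equiv track=rewrite | github.com/karolisr/PhyloMill | krusearch.py | decode_compressed_alignment
-- ===== SOURCE A (Python) =====
-- def decode_compressed_alignment(comp_aln):
--
--     # >>> import re
--     # >>> s = "5d4h2s"
--     # >>> p = re.compile("([0-9])([a-z])")
--     # >>> for m in p.findall(s):
--     # ...   print m
--     # ...
--     # ('5', 'd')
--     # ('4', 'h')
--     # ('2', 's')
--
--     idxs_in_str = lambda x: [i for i, ltr in enumerate(x[0]) if ltr in x[1]]
--     category_idxs = idxs_in_str((comp_aln, 'MDI'))
--
--     ret_value = list()
--
--     for i, j in enumerate(category_idxs):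
--         count = 1
--         if j > 0:
--             if i == 0:
--                 count = comp_aln[0:j]
--             else:
--                 count = comp_aln[category_idxs[i-1]+1:j]
--         if count == '':
--             count = 1
--         count = int(count)
--         ret_value.append([count, comp_aln[j:j+1]])
--
--     return(ret_value)
-- ===== SOURCE B (Python) =====
-- def decode_compressed_alignment(comp_aln):
--     ret_value = []
--     buf = ''
--     for ch in comp_aln:
--         if ch in 'MDI':
--             ret_value.append([1 if buf == '' else int(buf), ch])
--             buf = ''
--         else:
--             buf += ch
--     return ret_value
-- ===== Notes on version B (the rewrite author's own statement) =====
-- stated objective: simpler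
-- what changed: Replaces the two-pass index-list approach (collect all marker indices, then slice the string between consecutive marker indices) with a single left-to-right pass that accumulates inter-marker characters in a buffer and flushes it at each marker; both raise ValueError on the same inputs, which Pre_ excludes.
import Mathlib
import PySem

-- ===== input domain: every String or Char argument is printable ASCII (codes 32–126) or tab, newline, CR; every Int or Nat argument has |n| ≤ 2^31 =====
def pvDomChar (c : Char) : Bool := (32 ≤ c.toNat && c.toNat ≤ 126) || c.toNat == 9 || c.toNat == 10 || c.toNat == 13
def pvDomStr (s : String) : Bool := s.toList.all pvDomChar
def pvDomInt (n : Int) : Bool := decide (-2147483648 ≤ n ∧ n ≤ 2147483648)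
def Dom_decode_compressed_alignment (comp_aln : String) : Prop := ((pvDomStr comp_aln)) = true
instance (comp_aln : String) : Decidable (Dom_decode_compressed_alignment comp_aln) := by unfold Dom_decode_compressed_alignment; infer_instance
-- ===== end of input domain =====

-- B replaces A's two passes (collect marker indices, then slice between consecutive indices)
-- by a single pass with a character buffer flushed at each marker; same return value wherever
-- Python A returns (both raise ValueError on the same inputs, excluded by Pre_).

def pvMarkers : List Char := ['M', 'D', 'I']

-- ===== PORT A =====
-- idxs_in_str((comp_aln, 'MDI')): indices i with comp_aln[i] in 'MDI'
def pvIdxsA (cs : List Char) : List Int :=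
  ((PySem.List.enumerate cs).filter (fun p => decide (p.2 ∈ pvMarkers))).map (·.1)

def decode_compressed_alignment (comp_aln : String) : List (Int × String) :=
  let cs := comp_aln.toList
  let category_idxs := pvIdxsA cs
  (PySem.List.enumerate category_idxs).foldl (fun ret_value p =>
    let i := p.1
    let j := p.2
    let count : Int :=
      if j > 0 then
        let seg : List Char :=
          if i = 0 then PySem.List.slice cs (some 0) (some j)
          else PySem.List.slice cs (some (PySem.List.pyGetD category_idxs (i - 1) 0 + 1)) (some j)
        -- if count == '': count = 1; count = int(count)   (int() none-case excluded by Pre_)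
        if seg = [] then 1 else (PySem.Int.ofStr? (String.ofList seg)).getD 0
      else 1
    ret_value ++ [(count, String.ofList (PySem.List.slice cs (some j) (some (j + 1))))]) []

-- ===== PORT B =====
def decode_compressed_alignment_alt (comp_aln : String) : List (Int × String) :=
  (comp_aln.toList.foldl
    (fun (st : List Char × List (Int × String)) ch =>
      if ch ∈ pvMarkers then
        ([], st.2 ++ [((if st.1 = [] then (1 : Int) else (PySem.Int.ofStr? (String.ofList st.1)).getD 0),
                       String.ofList [ch])])
      else (st.1 ++ [ch], st.2))
    ([], [])).2

-- ===== PRECONDITION & SPEC =====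
-- the maximal runs of non-marker characters that precede some marker (runs after the last marker are never parsed)
def pvSegsBefore : List Char → List Char → List (List Char)
  | [], _ => []
  | c :: rest, buf =>
    if c ∈ pvMarkers then buf :: pvSegsBefore rest [] else pvSegsBefore rest (buf ++ [c])

-- Pre_ excludes exactly the inputs where Python A raises ValueError: some run of characters
-- before a marker is nonempty yet not a valid int() literal.
def Pre_decode_compressed_alignment (comp_aln : String) : Prop :=
  ∀ seg ∈ pvSegsBefore comp_aln.toList [],
    seg = [] ∨ (PySem.Int.ofStr? (String.ofList seg)).isSome = true
instance (comp_aln : String) : Decidable (Pre_decode_compressed_alignment comp_aln) := by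
  unfold Pre_decode_compressed_alignment; infer_instance

def pvWitness_decode_compressed_alignment : String := "12M3IDx"

def Spec_decode_compressed_alignment (comp_aln : String) (out : List (Int × String)) : Prop :=
  out = decode_compressed_alignment_alt comp_aln
instance (comp_aln : String) (out : List (Int × String)) :
    Decidable (Spec_decode_compressed_alignment comp_aln out) := by
  unfold Spec_decode_compressed_alignment; infer_instance

-- ===== CLAIM (what is proved, stated in full; the proofs are below) =====
def Claim_equal_decode_compressed_alignment : Prop :=
  ∀ (comp_aln : String), Dom_decode_compressed_alignment comp_aln →
    Pre_decode_compressed_alignment comp_aln →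
    Spec_decode_compressed_alignment comp_aln (decode_compressed_alignment comp_aln)

-- ===== LEMMAS AND PROOFS =====

-- shared count of a buffered segment
def pvCnt (buf : List Char) : Int :=
  if buf = [] then 1 else (PySem.Int.ofStr? (String.ofList buf)).getD 0

-- the common specification: one pass, flushing the buffer at each marker
def pvSpecRec : List Char → List Char → List (Int × String)
  | [], _ => []
  | c :: rest, buf =>
    if c ∈ pvMarkers then (pvCnt buf, String.ofList [c]) :: pvSpecRec rest []
    else pvSpecRec rest (buf ++ [c])

theorem pvB_fold (cs : List Char) (buf : List Char) (acc : List (Int × String)) :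
    (cs.foldl
      (fun (st : List Char × List (Int × String)) ch =>
        if ch ∈ pvMarkers then
          ([], st.2 ++ [((if st.1 = [] then (1 : Int) else (PySem.Int.ofStr? (String.ofList st.1)).getD 0),
                         String.ofList [ch])])
        else (st.1 ++ [ch], st.2))
      (buf, acc)).2 = acc ++ pvSpecRec cs buf := by
  induction cs generalizing buf acc with
  | nil => simp [pvSpecRec]
  | cons c rest ih =>
    by_cases h : c ∈ pvMarkers
    · simp only [List.foldl_cons, h, if_true]
      rw [ih]
      simp [pvSpecRec, pvCnt, h]
    · simp only [List.foldl_cons, h, if_false]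
      rw [ih]
      simp [pvSpecRec, h]

theorem pvB_eq_spec (s : String) :
    decode_compressed_alignment_alt s = pvSpecRec s.toList [] := by
  simpa [decode_compressed_alignment_alt] using pvB_fold s.toList [] []


-- ---- A-side machinery ----

-- A's loop body as a function of one enumerate entry
def pvSegA (cs : List Char) (idxs : List Int) (p : Int × Int) : List Char :=
  if p.1 = 0 then PySem.List.slice cs (some 0) (some p.2)
  else PySem.List.slice cs (some (PySem.List.pyGetD idxs (p.1 - 1) 0 + 1)) (some p.2)

def pvBody (cs : List Char) (idxs : List Int) (p : Int × Int) : Int × String :=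
  ((if p.2 > 0 then pvCnt (pvSegA cs idxs p) else 1),
   String.ofList (PySem.List.slice cs (some p.2) (some (p.2 + 1))))

theorem pvA_as_map (s : String) :
    decode_compressed_alignment s =
      (PySem.List.enumerate (pvIdxsA s.toList)).map (pvBody s.toList (pvIdxsA s.toList)) :=
  PySem.List.foldl_append_singleton_eq_map (pvBody s.toList (pvIdxsA s.toList)) _ []

-- enumerate start-shift and enumerate-of-map
theorem pvEnum_shift {α : Type} (l : List α) (s : Int) :
    PySem.List.enumerate l s = (PySem.List.enumerate l 0).map (fun p => (p.1 + s, p.2)) := by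
  induction l generalizing s with
  | nil => simp [PySem.List.enumerate_nil]
  | cons c t ih =>
    rw [PySem.List.enumerate_cons, PySem.List.enumerate_cons, ih, ih (0 + 1)]
    simp [Function.comp]
    exact fun a b _ => by ring

theorem pvEnum_map {α β : Type} (l : List α) (h : α → β) (s : Int) :
    PySem.List.enumerate (l.map h) s = (PySem.List.enumerate l s).map (fun p => (p.1, h p.2)) := by
  induction l generalizing s with
  | nil => simp [PySem.List.enumerate_nil]
  | cons c t ih => rw [List.map_cons, PySem.List.enumerate_cons, PySem.List.enumerate_cons, ih]; simp

-- pvIdxsA facts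
theorem pvIdxs_nil_of_clean (cs : List Char) (h : ∀ c ∈ cs, c ∉ pvMarkers) :
    pvIdxsA cs = [] := by
  unfold pvIdxsA
  rw [List.filter_eq_nil_iff.mpr, List.map_nil]
  intro p hp
  rw [PySem.List.mem_enumerate_iff] at hp
  obtain ⟨k, hk, rfl⟩ := hp
  simpa using h _ (List.getElem_mem hk)

theorem pvIdxs_nonneg (cs : List Char) : ∀ x ∈ pvIdxsA cs, 0 ≤ x := by
  intro x hx
  unfold pvIdxsA at hx
  obtain ⟨p, hp, rfl⟩ := List.mem_map.mp hx
  have := List.mem_of_mem_filter hp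
  rw [PySem.List.mem_enumerate_iff] at this
  obtain ⟨k, hk, rfl⟩ := this
  simp

theorem pvIdxs_sorted (cs : List Char) : (pvIdxsA cs).Pairwise (· < ·) := by
  unfold pvIdxsA
  exact List.Pairwise.map _ (fun a b h => h)
    (List.Pairwise.filter _ (PySem.List.pairwise_lt_enumerate cs 0))

theorem pvIdxs_decomp (pre : List Char) (m : Char) (rest : List Char)
    (hpre : ∀ c ∈ pre, c ∉ pvMarkers) (hm : m ∈ pvMarkers) :
    pvIdxsA (pre ++ m :: rest) =
      (pre.length : Int) :: (pvIdxsA rest).map (· + ((pre.length : Int) + 1)) := by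
  unfold pvIdxsA
  rw [PySem.List.enumerate_append, List.filter_append]
  rw [show ((PySem.List.enumerate pre 0).filter (fun p => decide (p.2 ∈ pvMarkers))) = [] from by
    rw [List.filter_eq_nil_iff]
    intro p hp
    rw [PySem.List.mem_enumerate_iff] at hp
    obtain ⟨k, hk, rfl⟩ := hp
    simpa using hpre _ (List.getElem_mem hk)]
  rw [PySem.List.enumerate_cons, pvEnum_shift rest]
  simp only [List.nil_append, List.filter_cons, hm, decide_true, List.filter_map,
    List.map_map, if_true]
  rw [List.map_cons]
  refine congrArg₂ (· :: ·) (by simp) ?_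
  rw [show ((fun (p : Int × Char) => decide (p.2 ∈ pvMarkers)) ∘
      (fun (p : Int × Char) => (p.1 + (0 + (pre.length : Int) + 1), p.2))) =
      (fun (p : Int × Char) => decide (p.2 ∈ pvMarkers)) from by funext p; simp]
  rw [List.map_map]
  apply List.map_congr_left
  intro p _
  simp [Function.comp]

-- pvSpecRec facts
theorem pvSpec_nil_of_clean (cs : List Char) (h : ∀ c ∈ cs, c ∉ pvMarkers) :
    ∀ buf, pvSpecRec cs buf = [] := by
  induction cs with
  | nil => intro buf; rfl
  | cons c rest ih =>
    intro buf
    rw [pvSpecRec, if_neg (h c List.mem_cons_self)]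
    exact ih (fun x hx => h x (List.mem_cons_of_mem _ hx)) _

theorem pvSpec_decomp (pre : List Char) (m : Char) (rest : List Char)
    (hpre : ∀ c ∈ pre, c ∉ pvMarkers) (hm : m ∈ pvMarkers) :
    ∀ buf, pvSpecRec (pre ++ m :: rest) buf =
      (pvCnt (buf ++ pre), String.ofList [m]) :: pvSpecRec rest [] := by
  induction pre with
  | nil => intro buf; simp [pvSpecRec, hm]
  | cons c pre' ih =>
    intro buf
    rw [List.cons_append, pvSpecRec, if_neg (hpre c List.mem_cons_self),
      ih (fun x hx => hpre x (List.mem_cons_of_mem _ hx))]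
    simp

-- slice shift across a marker-terminated prefix
theorem pvSlice_shift (pre : List Char) (m : Char) (rest : List Char) (a b : Int)
    (ha : 0 ≤ a) (hb : 0 ≤ b) :
    PySem.List.slice (pre ++ m :: rest) (some (a + ((pre.length : Int) + 1)))
        (some (b + ((pre.length : Int) + 1))) = PySem.List.slice rest (some a) (some b) := by
  rw [PySem.List.slice_toNat _ (by omega) (by omega), PySem.List.slice_toNat _ ha hb]
  have h1 : (a + ((pre.length : Int) + 1)).toNat = (pre ++ [m]).length + a.toNat := by
    simp; omega
  have h2 : (b + ((pre.length : Int) + 1)).toNat - ((pre ++ [m]).length + a.toNat)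
      = b.toNat - a.toNat := by simp; omega
  rw [h1, h2, show pre ++ m :: rest = (pre ++ [m]) ++ rest by simp,
    List.drop_length_add_append]

theorem pvSlice_zero_zero (l : List Char) : PySem.List.slice l (some 0) (some 0) = [] := by
  rw [PySem.List.slice_toNat l le_rfl le_rfl]
  simp

theorem pvBody_head (pre : List Char) (m : Char) (rest : List Char) (idxs : List Int) :
    pvBody (pre ++ m :: rest) idxs (0, (pre.length : Int)) = (pvCnt pre, String.ofList [m]) := by
  simp only [pvBody, pvSegA]
  refine congrArg₂ Prod.mk ?_ ?_
  · by_cases hL : ((pre.length : Int)) > 0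
    · rw [if_pos hL, PySem.List.slice_toNat _ le_rfl (by omega)]
      simp
    · have hpre : pre = [] := by
        have : pre.length = 0 := by omega
        exact List.eq_nil_of_length_eq_zero this
      rw [if_neg hL, hpre]
      simp [pvCnt]
  · rw [PySem.List.slice_toNat _ (by omega) (by omega)]
    have h1 : ((pre.length : Int)).toNat = pre.length := by omega
    have h2 : ((pre.length : Int) + 1).toNat - pre.length = 1 := by omega
    rw [h1, h2, List.drop_left]
    rfl

theorem pvBody_shift (pre : List Char) (m : Char) (rest : List Char)
    (k : Nat) (hk : k < (pvIdxsA rest).length) :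
    pvBody (pre ++ m :: rest)
        ((pre.length : Int) :: (pvIdxsA rest).map (· + ((pre.length : Int) + 1)))
        ((k : Int) + 1, (pvIdxsA rest)[k] + ((pre.length : Int) + 1))
      = pvBody rest (pvIdxsA rest) ((k : Int), (pvIdxsA rest)[k]) := by
  have hj0 : 0 ≤ (pvIdxsA rest)[k] :=
    pvIdxs_nonneg rest _ (List.getElem_mem hk)
  simp only [pvBody, pvSegA]
  refine congrArg₂ Prod.mk ?_ ?_
  · rw [if_pos (show (pvIdxsA rest)[k] + ((pre.length : Int) + 1) > 0 by omega),
      if_neg (show ¬ ((k : Int) + 1 = 0) by omega)]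
    cases k with
    | zero =>
      rw [show ((0 : Nat) : Int) + 1 - 1 = (0 : Int) by omega, PySem.List.pyGetD_zero_cons]
      have hsh : PySem.List.slice (pre ++ m :: rest) (some ((pre.length : Int) + 1))
          (some ((pvIdxsA rest)[0] + ((pre.length : Int) + 1)))
          = PySem.List.slice rest (some 0) (some (pvIdxsA rest)[0]) := by
        have := pvSlice_shift pre m rest 0 _ le_rfl hj0
        simpa using this
      rw [hsh]
      simp only [Nat.cast_zero]
      by_cases hj : (pvIdxsA rest)[0] > 0
      · simp [hj]
      · rw [if_neg hj, show (pvIdxsA rest)[0] = (0 : Int) by omega, pvSlice_zero_zero]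
        simp [pvCnt]
    | succ k' =>
      have hk' : k' < (pvIdxsA rest).length := by omega
      have hlt : (pvIdxsA rest)[k'] < (pvIdxsA rest)[k' + 1] :=
        List.pairwise_iff_getElem.mp (pvIdxs_sorted rest) k' (k' + 1) hk' hk (by omega)
      have hj0' : 0 ≤ (pvIdxsA rest)[k'] :=
        pvIdxs_nonneg rest _ (List.getElem_mem hk')
      rw [show (((k' + 1 : Nat)) : Int) + 1 - 1 = (((k' + 1 : Nat)) : Int) by ring]
      have hbig : PySem.List.pyGetD
          ((pre.length : Int) :: (pvIdxsA rest).map (· + ((pre.length : Int) + 1)))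
          (((k' + 1 : Nat)) : Int) 0 = (pvIdxsA rest)[k'] + ((pre.length : Int) + 1) := by
        rw [PySem.List.pyGetD_eq_getElem _ 0 (by omega) (by simp; omega)]
        simp
      have hsmall : PySem.List.pyGetD (pvIdxsA rest) ((((k' + 1 : Nat)) : Int) - 1) 0
          = (pvIdxsA rest)[k'] := by
        rw [show (((k' + 1 : Nat)) : Int) - 1 = ((k' : Nat) : Int) by push_cast; ring]
        rw [PySem.List.pyGetD_eq_getElem _ 0 (by omega) (by simp; omega)]
        simp
      rw [hbig, hsmall]
      have hsh : PySem.List.slice (pre ++ m :: rest)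
          (some ((pvIdxsA rest)[k'] + ((pre.length : Int) + 1) + 1))
          (some ((pvIdxsA rest)[k' + 1] + ((pre.length : Int) + 1)))
          = PySem.List.slice rest (some ((pvIdxsA rest)[k'] + 1))
              (some (pvIdxsA rest)[k' + 1]) := by
        have := pvSlice_shift pre m rest ((pvIdxsA rest)[k'] + 1) ((pvIdxsA rest)[k' + 1])
          (by omega) hj0
        rw [show (pvIdxsA rest)[k'] + ((pre.length : Int) + 1) + 1
            = ((pvIdxsA rest)[k'] + 1) + ((pre.length : Int) + 1) by ring]
        exact this
      rw [hsh]
      rw [if_pos (show (pvIdxsA rest)[k' + 1] > 0 by omega),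
        if_neg (show ¬ (((k' + 1 : Nat) : Int) = 0) by omega)]
  · have hsh : PySem.List.slice (pre ++ m :: rest)
        (some ((pvIdxsA rest)[k] + ((pre.length : Int) + 1)))
        (some ((pvIdxsA rest)[k] + ((pre.length : Int) + 1) + 1))
        = PySem.List.slice rest (some (pvIdxsA rest)[k]) (some ((pvIdxsA rest)[k] + 1)) := by
      have := pvSlice_shift pre m rest ((pvIdxsA rest)[k]) ((pvIdxsA rest)[k] + 1)
        hj0 (by omega)
      rw [show (pvIdxsA rest)[k] + ((pre.length : Int) + 1) + 1
          = ((pvIdxsA rest)[k] + 1) + ((pre.length : Int) + 1) by ring]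
      exact this
    rw [hsh]

theorem pvDropWhile_head {α : Type} (p : α → Bool) :
    ∀ (l : List α) (m : α) (rest : List α), l.dropWhile p = m :: rest → p m = false := by
  intro l
  induction l with
  | nil => intro m rest h; simp [List.dropWhile] at h
  | cons a t ih =>
    intro m rest h
    by_cases hp : p a
    · rw [List.dropWhile_cons_of_pos hp] at h
      exact ih _ _ h
    · rw [List.dropWhile_cons_of_neg hp] at h
      cases h
      simpa using hp

theorem pvA_aux : ∀ (n : Nat) (cs : List Char), cs.length ≤ n →
    (PySem.List.enumerate (pvIdxsA cs)).map (pvBody cs (pvIdxsA cs)) = pvSpecRec cs [] := by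
  intro n
  induction n with
  | zero =>
    intro cs h
    have hnil : cs = [] := List.eq_nil_of_length_eq_zero (by omega)
    subst hnil
    simp [pvIdxsA, pvSpecRec, PySem.List.enumerate_nil]
  | succ n ih =>
    intro cs hlen
    by_cases hclean : ∀ c ∈ cs, c ∉ pvMarkers
    · rw [pvIdxs_nil_of_clean cs hclean, pvSpec_nil_of_clean cs hclean]
      simp [PySem.List.enumerate_nil]
    · obtain ⟨m, rest, hd⟩ : ∃ m rest,
          cs.dropWhile (fun c => !(decide (c ∈ pvMarkers))) = m :: rest := by
        cases h : cs.dropWhile (fun c => !(decide (c ∈ pvMarkers))) with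
        | nil =>
          exact absurd (fun c hc => by simpa using List.dropWhile_eq_nil_iff.mp h c hc) hclean
        | cons m rest => exact ⟨m, rest, rfl⟩
      have hcs : cs = cs.takeWhile (fun c => !(decide (c ∈ pvMarkers))) ++ m :: rest := by
        rw [← hd, List.takeWhile_append_dropWhile]
      set pre := cs.takeWhile (fun c => !(decide (c ∈ pvMarkers))) with hpredef
      have hpre : ∀ c ∈ pre, c ∉ pvMarkers := by
        intro c hc
        simpa using List.mem_takeWhile_imp hc
      have hm : m ∈ pvMarkers := by
        simpa using pvDropWhile_head _ cs m rest hd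
      have hrest : rest.length ≤ n := by
        have := congrArg List.length hcs
        simp at this
        omega
      rw [hcs, pvIdxs_decomp pre m rest hpre hm, PySem.List.enumerate_cons, List.map_cons,
        pvBody_head, pvSpec_decomp pre m rest hpre hm (buf := []), List.nil_append]
      congr 1
      rw [pvEnum_map _ _ (0 + 1), pvEnum_shift _ (0 + 1), List.map_map, List.map_map,
        ← ih rest hrest]
      apply List.map_congr_left
      intro p hp
      rw [PySem.List.mem_enumerate_iff] at hp
      obtain ⟨k, hkl, rfl⟩ := hp
      simp only [Function.comp, zero_add]
      exact pvBody_shift pre m rest k hkl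

theorem pvA_eq_spec (s : String) :
    decode_compressed_alignment s = pvSpecRec s.toList [] := by
  rw [pvA_as_map]
  exact pvA_aux s.toList.length s.toList le_rfl

-- ===== VERDICT (by name: the statement is the Claim_ definition above) =====
theorem decode_compressed_alignment_spec : Claim_equal_decode_compressed_alignment := by
  intro s _ _
  unfold Spec_decode_compressed_alignment
  rw [pvA_eq_spec, pvB_eq_spec]
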